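-- pv_equiv track=rewrite | github.com/numsarai/Saraithong-BSIE | utils/app_helpers.py | mapping_feedback_status
-- ===== SOURCE A (Python) =====
-- def normalized_mapping_snapshot(mapping: dict | None) -> dict[str, str]:
--     """Return a cleaned {str: str} copy of a mapping dict."""
--     if not isinstance(mapping, dict):
--         return {}
--     snapshot: dict[str, str] = {}
--     for key, value in mapping.items():
--         text_key = str(key or "").strip()
--         if not text_key:
--             continue
--         text_value = str(value or "").strip()
--         snapshot[text_key] = text_value
--     return snapshot
--
-- def mapping_feedback_status(confirmed_mapping: dict, suggested_mapping: dict) -> str: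
--     """Classify the user's mapping confirmation relative to the suggestion."""
--     suggested_snapshot = normalized_mapping_snapshot(suggested_mapping)
--     if not suggested_snapshot:
--         return "accepted"
--
--     confirmed_snapshot = normalized_mapping_snapshot(confirmed_mapping)
--     all_keys = sorted(set(confirmed_snapshot) | set(suggested_snapshot))
--     for key in all_keys:
--         confirmed_value = confirmed_snapshot.get(key, "")
--         suggested_value = suggested_snapshot.get(key, "")
--         if confirmed_value != suggested_value and (confirmed_value or suggested_value):
--             return "corrected"
--     return "confirmed"
-- ===== SOURCE B (Python) =====
-- def normalized_mapping_snapshot(mapping: dict | None) -> dict[str, str]: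
--     """Return a cleaned {str: str} copy of a mapping dict."""
--     if not isinstance(mapping, dict):
--         return {}
--     snapshot: dict[str, str] = {}
--     for key, value in mapping.items():
--         text_key = str(key or "").strip()
--         if not text_key:
--             continue
--         text_value = str(value or "").strip()
--         snapshot[text_key] = text_value
--     return snapshot
--
-- def mapping_feedback_status(confirmed_mapping: dict, suggested_mapping: dict) -> str:
--     """Classify the user's mapping confirmation relative to the suggestion."""
--     suggested_snapshot = normalized_mapping_snapshot(suggested_mapping)
--     if not suggested_snapshot:
--         return "accepted"
--     confirmed_clean = {k: v for k, v in normalized_mapping_snapshot(confirmed_mapping).items() if v}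
--     suggested_clean = {k: v for k, v in suggested_snapshot.items() if v}
--     return "confirmed" if confirmed_clean == suggested_clean else "corrected"
-- ===== Notes on version B (the rewrite author's own statement) =====
-- stated objective: simpler
-- what changed: Replaces A's sorted-union-of-keys scan with per-key .get comparisons by filtering empty-string values out of both snapshots once and returning 'corrected' iff the two cleaned dicts are unequal as dicts.
import Mathlib
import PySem

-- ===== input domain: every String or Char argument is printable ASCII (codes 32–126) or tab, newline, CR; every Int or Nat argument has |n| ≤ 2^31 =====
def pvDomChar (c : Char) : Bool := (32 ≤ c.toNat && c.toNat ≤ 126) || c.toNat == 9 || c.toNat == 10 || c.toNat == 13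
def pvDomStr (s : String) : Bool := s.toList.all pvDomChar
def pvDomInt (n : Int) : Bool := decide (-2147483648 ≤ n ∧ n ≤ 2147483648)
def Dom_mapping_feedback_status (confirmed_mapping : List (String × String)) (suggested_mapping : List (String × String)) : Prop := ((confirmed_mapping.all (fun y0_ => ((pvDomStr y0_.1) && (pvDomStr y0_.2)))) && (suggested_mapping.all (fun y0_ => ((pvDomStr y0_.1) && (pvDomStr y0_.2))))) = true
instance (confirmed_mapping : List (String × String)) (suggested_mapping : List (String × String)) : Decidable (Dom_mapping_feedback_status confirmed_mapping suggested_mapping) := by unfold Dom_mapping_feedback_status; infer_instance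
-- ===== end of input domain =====

-- B replaces A's sorted-key-union scan with a dict-equality comparison of the two
-- empty-value-filtered snapshots (objective: simpler).

-- ===== PORT A =====
-- shared module helper: normalized_mapping_snapshot (the incoming Python dict is the
-- association list read as a dict, so we iterate over (Dict.ofList _).items)
def normalizedMappingSnapshot (mapping : List (String × String)) : PySem.Dict String String :=
  (PySem.Dict.ofList mapping).items.foldl
    (fun snapshot kv =>
      let textKey := PySem.Str.strip kv.1
      if textKey = "" then snapshot
      else snapshot.insert textKey (PySem.Str.strip kv.2))
    PySem.Dict.empty

-- A's for-loop over the sorted key union, with its early return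
def mfsScan (confirmed_snapshot suggested_snapshot : PySem.Dict String String) :
    List String → String
  | [] => "confirmed"
  | k :: ks =>
    let confirmed_value := confirmed_snapshot.getD k ""
    let suggested_value := suggested_snapshot.getD k ""
    if confirmed_value ≠ suggested_value ∧ (confirmed_value ≠ "" ∨ suggested_value ≠ "") then
      "corrected"
    else mfsScan confirmed_snapshot suggested_snapshot ks

def mapping_feedback_status (confirmed_mapping : List (String × String)) (suggested_mapping : List (String × String)) : String :=
  let suggested_snapshot := normalizedMappingSnapshot suggested_mapping
  if suggested_snapshot.items.isEmpty then "accepted"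
  else
    let confirmed_snapshot := normalizedMappingSnapshot confirmed_mapping
    let all_keys := PySem.List.sorted
      (PySem.Set.union (PySem.Set.ofList confirmed_snapshot.keys) suggested_snapshot.keys)
      (fun x => x) false
    mfsScan confirmed_snapshot suggested_snapshot all_keys

-- ===== PORT B =====
-- {k: v for k, v in d.items() if v}
def filterNonEmpty (d : PySem.Dict String String) : PySem.Dict String String :=
  d.items.foldl (fun acc kv => if kv.2 ≠ "" then acc.insert kv.1 kv.2 else acc)
    PySem.Dict.empty

-- Python's dict == (order-insensitive equality of finite maps)
def pyDictEq (d1 d2 : PySem.Dict String String) : Bool :=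
  d1.items.all (fun kv => d2.get? kv.1 == some kv.2) &&
  d2.items.all (fun kv => d1.get? kv.1 == some kv.2)

def mapping_feedback_status_alt (confirmed_mapping : List (String × String)) (suggested_mapping : List (String × String)) : String :=
  let suggested_snapshot := normalizedMappingSnapshot suggested_mapping
  if suggested_snapshot.items.isEmpty then "accepted"
  else
    let confirmed_clean := filterNonEmpty (normalizedMappingSnapshot confirmed_mapping)
    let suggested_clean := filterNonEmpty suggested_snapshot
    if pyDictEq confirmed_clean suggested_clean then "confirmed" else "corrected"

-- ===== PRECONDITION & SPEC =====
def Spec_mapping_feedback_status (confirmed_mapping : List (String × String)) (suggested_mapping : List (String × String)) (out : String) : Prop := out = mapping_feedback_status_alt confirmed_mapping suggested_mapping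
instance (confirmed_mapping : List (String × String)) (suggested_mapping : List (String × String)) (out : String) : Decidable (Spec_mapping_feedback_status confirmed_mapping suggested_mapping out) := by unfold Spec_mapping_feedback_status; infer_instance

-- ===== CLAIM (what is proved, stated in full; the proofs are below) =====
def Claim_equal_mapping_feedback_status : Prop := ∀ (confirmed_mapping : List (String × String)) (suggested_mapping : List (String × String)), Dom_mapping_feedback_status confirmed_mapping suggested_mapping → Spec_mapping_feedback_status confirmed_mapping suggested_mapping (mapping_feedback_status confirmed_mapping suggested_mapping)

-- ===== LEMMAS AND PROOFS =====

-- the snapshot fold keeps its keys Nodup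
theorem nodup_keys_snapFold (l : List (String × String)) (d : PySem.Dict String String)
    (h : d.keys.Nodup) :
    (l.foldl (fun snapshot kv =>
      let textKey := PySem.Str.strip kv.1
      if textKey = "" then snapshot
      else snapshot.insert textKey (PySem.Str.strip kv.2)) d).keys.Nodup := by
  induction l generalizing d with
  | nil => exact h
  | cons kv t ih =>
    simp only [List.foldl_cons]
    apply ih
    split
    · exact h
    · exact PySem.Dict.nodup_keys_insert _ _ _ h

theorem nodup_keys_snap (m : List (String × String)) :
    (normalizedMappingSnapshot m).keys.Nodup := by
  exact nodup_keys_snapFold _ _ PySem.Dict.nodup_keys_empty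

-- k absent from the keys of l ⇒ find? fails
theorem find?_eq_none_of_not_mem_keys (l : List (String × String)) (k : String)
    (h : k ∉ l.map Prod.fst) : l.find? (fun kv => kv.1 == k) = none := by
  rw [List.find?_eq_none]
  intro kv hkv
  simp only [beq_iff_eq]
  intro hk
  exact h (List.mem_map.mpr ⟨kv, hkv, hk⟩)

-- get? through the filtering fold
theorem filterFold_get? (l : List (String × String)) (e : PySem.Dict String String)
    (k : String) (hl : (l.map Prod.fst).Nodup) :
    (l.foldl (fun acc kv => if kv.2 ≠ "" then acc.insert kv.1 kv.2 else acc) e).get? k =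
      match l.find? (fun kv => kv.1 == k) with
      | some kv => if kv.2 = "" then e.get? k else some kv.2
      | none => e.get? k := by
  induction l generalizing e with
  | nil => simp
  | cons kv t ih =>
    simp only [List.map_cons, List.nodup_cons] at hl
    obtain ⟨hk1, ht⟩ := hl
    simp only [List.foldl_cons, List.find?_cons]
    by_cases hkk : kv.1 = k
    · subst hkk
      have hnone : t.find? (fun p => p.1 == kv.1) = none :=
        find?_eq_none_of_not_mem_keys t kv.1 hk1
      rw [ih _ ht, hnone]
      simp only [BEq.rfl]
      by_cases hv : kv.2 = ""
      · simp [hv]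
      · simp [hv, PySem.Dict.get?_insert_self]
    · have : (kv.1 == k) = false := by simp [hkk]
      rw [this, ih _ ht]
      have hstep : (if kv.2 ≠ "" then e.insert kv.1 kv.2 else e).get? k = e.get? k := by
        split
        · exact PySem.Dict.get?_insert_of_ne e kv.2 (fun h => hkk h.symm)
        · rfl
      cases t.find? (fun p => p.1 == k) with
      | none => exact hstep
      | some p => simp only [hstep]

-- get? of the filtered dict, in terms of getD of the original
theorem filter_get? (d : PySem.Dict String String) (h : d.keys.Nodup) (k : String) :
    (filterNonEmpty d).get? k =
      if d.getD k "" = "" then none else some (d.getD k "") := by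
  have hl : (d.items.map Prod.fst).Nodup := h
  rw [filterNonEmpty, filterFold_get? d.items PySem.Dict.empty k hl]
  rw [PySem.Dict.getD_eq_get?_getD]
  show (match d.items.find? (fun kv => kv.1 == k) with
      | some kv => if kv.2 = "" then PySem.Dict.empty.get? k else some kv.2
      | none => PySem.Dict.empty.get? k) = _
  have hget : d.get? k = Option.map (fun x => x.2) (d.items.find? (fun p => p.1 == k)) := rfl
  rw [hget]
  cases hf : d.items.find? (fun p => p.1 == k) with
  | none => simp
  | some kv =>
    by_cases hv : kv.2 = "" <;> simp [hv, PySem.Dict.get?_empty]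

-- A's loop is an all-check
theorem mfsScan_eq (cs ss : PySem.Dict String String) (l : List String) :
    mfsScan cs ss l =
      if l.all (fun k => cs.getD k "" == ss.getD k "") then "confirmed" else "corrected" := by
  induction l with
  | nil => simp [mfsScan]
  | cons k t ih =>
    simp only [mfsScan, List.all_cons, ih]
    by_cases hcv : cs.getD k "" = ss.getD k ""
    · simp [hcv]
    · have hor : cs.getD k "" ≠ "" ∨ ss.getD k "" ≠ "" := by
        by_cases h1 : cs.getD k "" = ""
        · right; intro h2; exact hcv (h1.trans h2.symm)
        · left; exact h1
      simp [hcv, hor]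

-- Python dict == is pointwise get? equality (for Nodup keys)
theorem pyDictEq_iff (d1 d2 : PySem.Dict String String)
    (h1 : d1.keys.Nodup) (h2 : d2.keys.Nodup) :
    pyDictEq d1 d2 = true ↔ ∀ k, d1.get? k = d2.get? k := by
  rw [pyDictEq, Bool.and_eq_true, List.all_eq_true, List.all_eq_true]
  constructor
  · rintro ⟨ha, hb⟩ k
    cases hc : d1.get? k with
    | some v =>
      have := ha (k, v) (PySem.Dict.mem_items_of_get?_eq_some d1 hc)
      simp only [beq_iff_eq] at this
      exact this.symm
    | none =>
      cases hs : d2.get? k with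
      | none => rfl
      | some w =>
        have := hb (k, w) (PySem.Dict.mem_items_of_get?_eq_some d2 hs)
        simp only [beq_iff_eq] at this
        rw [hc] at this; exact this
  · intro h
    constructor
    · rintro ⟨k0, v0⟩ hkv
      have : d1.get? k0 = some v0 := PySem.Dict.get?_of_mem_items d1 hkv h1
      simp [← h k0, this]
    · rintro ⟨k0, v0⟩ hkv
      have : d2.get? k0 = some v0 := PySem.Dict.get?_of_mem_items d2 hkv h2
      simp [h k0, this]

-- the filtering fold keeps keys Nodup
theorem nodup_keys_filter (d : PySem.Dict String String) :
    (filterNonEmpty d).keys.Nodup := by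
  rw [filterNonEmpty]
  generalize d.items = l
  have : ∀ (l : List (String × String)) (e : PySem.Dict String String), e.keys.Nodup →
      (l.foldl (fun acc kv => if kv.2 ≠ "" then acc.insert kv.1 kv.2 else acc) e).keys.Nodup := by
    intro l
    induction l with
    | nil => intro e he; exact he
    | cons kv t ih =>
      intro e he
      simp only [List.foldl_cons]
      apply ih
      split
      · exact PySem.Dict.nodup_keys_insert _ _ _ he
      · exact he
  exact this l _ PySem.Dict.nodup_keys_empty

-- a key outside both dicts contributes equal defaults
theorem pointwise_bridge (cs ss : PySem.Dict String String) :
    (∀ k, (k ∈ cs.keys ∨ k ∈ ss.keys) → cs.getD k "" = ss.getD k "") ↔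
      (∀ k, cs.getD k "" = ss.getD k "") := by
  constructor
  · intro h k
    by_cases hk : k ∈ cs.keys ∨ k ∈ ss.keys
    · exact h k hk
    · push Not at hk
      rw [PySem.Dict.getD_eq_get?_getD, PySem.Dict.getD_eq_get?_getD,
        (PySem.Dict.get?_eq_none_iff_not_mem_keys cs k).mpr hk.1,
        (PySem.Dict.get?_eq_none_iff_not_mem_keys ss k).mpr hk.2]
  · intro h k _
    exact h k

-- ===== VERDICT (by name: the statement is the Claim_ definition above) =====
theorem mapping_feedback_status_spec : Claim_equal_mapping_feedback_status := by
  intro c s _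
  unfold Spec_mapping_feedback_status mapping_feedback_status mapping_feedback_status_alt
  set ss := normalizedMappingSnapshot s with hss
  set cs := normalizedMappingSnapshot c with hcs
  by_cases hemp : ss.items.isEmpty
  · simp [hemp]
  · simp only [hemp, if_false, Bool.false_eq_true]
    rw [mfsScan_eq]
    have hcsn := nodup_keys_snap c
    have hssn := nodup_keys_snap s
    rw [← hcs] at hcsn; rw [← hss] at hssn
    have hbool :
        ((PySem.List.sorted
            (PySem.Set.union (PySem.Set.ofList cs.keys) ss.keys) (fun x => x) false).all
          (fun k => cs.getD k "" == ss.getD k ""))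
        = pyDictEq (filterNonEmpty cs) (filterNonEmpty ss) := by
      rw [Bool.eq_iff_iff]
      rw [List.all_eq_true]
      rw [pyDictEq_iff _ _ (nodup_keys_filter cs) (nodup_keys_filter ss)]
      constructor
      · intro hall k
        rw [filter_get? cs hcsn k, filter_get? ss hssn k]
        have heq : cs.getD k "" = ss.getD k "" := by
          refine (pointwise_bridge cs ss).mp ?_ k
          intro k' hk'
          have hmem : k' ∈ PySem.List.sorted
              (PySem.Set.union (PySem.Set.ofList cs.keys) ss.keys) (fun x => x) false := by
            rw [PySem.List.mem_sorted, PySem.Set.mem_union, PySem.Set.mem_ofList]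
            exact hk'
          simpa using hall k' hmem
        rw [heq]
      · intro hptw k _
        have := hptw k
        rw [filter_get? cs hcsn k, filter_get? ss hssn k] at this
        by_cases h1 : cs.getD k "" = "" <;> by_cases h2 : ss.getD k "" = "" <;>
          simp [h1, h2] at this ⊢
        exact this
    rw [hbool]
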